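-- pv_equiv track=rewrite | github.com/Lbelus/my_qwasar_lib | python/binary_prefix_divisible_by_.py | isdivby5
-- ===== SOURCE A (Python) =====
-- def isdivby5(bin_num):
--   index = len(bin_num) - 1
--   result = 0
--   r = []
--   while index >= 0:
--     bits = bin_num[-(index + 1)]
--     result += bits  * pow(2 , index)
--     r.append(result)
--     index -= 1
--   result %= 5
--   return result == 0
-- ===== SOURCE B (Python) =====
-- def isdivby5(bin_num):
--   rem = 0
--   for bit in bin_num:
--     rem = (rem * 2 + bit) % 5
--   return rem == 0
-- ===== Notes on version B (the rewrite author's own statement) =====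
-- stated objective: faster
-- what changed: Replaces the pow(2,index)-per-bit accumulation (and the unused appended list) with a single pass keeping only the running remainder rem=(rem*2+bit)%5.
import Mathlib
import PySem

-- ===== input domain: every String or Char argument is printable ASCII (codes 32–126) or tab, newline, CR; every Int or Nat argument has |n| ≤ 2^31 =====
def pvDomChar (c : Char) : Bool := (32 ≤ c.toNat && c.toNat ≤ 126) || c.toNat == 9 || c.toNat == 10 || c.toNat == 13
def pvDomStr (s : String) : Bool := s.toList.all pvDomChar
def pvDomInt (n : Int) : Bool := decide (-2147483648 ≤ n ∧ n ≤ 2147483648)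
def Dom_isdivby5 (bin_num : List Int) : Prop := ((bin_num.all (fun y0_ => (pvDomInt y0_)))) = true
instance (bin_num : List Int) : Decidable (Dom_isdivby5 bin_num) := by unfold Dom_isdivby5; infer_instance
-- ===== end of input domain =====

-- B replaces A's per-bit pow(2,index) accumulation (plus an unused growing list) with a
-- single pass keeping only the running remainder mod 5 (objective: faster, asymptotic).

-- ===== PORT A =====
-- the while loop: state (index, result, r); bin_num[-(index+1)] is always in range when
-- index ≥ 0 (Python never raises here), so the `.getD 0` default is unreachable.
def pvLoopA (bin_num : List Int) (index result : Int) (r : List Int) : Int × List Int :=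
  if h : index ≥ 0 then
    let bits := (PySem.List.pyGet? bin_num (-(index + 1))).getD 0
    let result := result + bits * 2 ^ index.toNat
    let r := r ++ [result]
    pvLoopA bin_num (index - 1) result r
  else
    (result, r)
termination_by (index + 1).toNat
decreasing_by simp_wf; omega

def isdivby5 (bin_num : List Int) : Bool :=
  let index : Int := (bin_num.length : Int) - 1
  let result : Int := 0
  let r : List Int := []
  let (result, _r) := pvLoopA bin_num index result r
  let result := PySem.Int.mod result 5
  result == 0

-- ===== PORT B =====
def isdivby5_alt (bin_num : List Int) : Bool :=
  (bin_num.foldl (fun rem bit => PySem.Int.mod (rem * 2 + bit) 5) 0) == 0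

-- ===== PRECONDITION & SPEC =====
def Spec_isdivby5 (bin_num : List Int) (out : Bool) : Prop := out = isdivby5_alt bin_num
instance (bin_num : List Int) (out : Bool) : Decidable (Spec_isdivby5 bin_num out) := by unfold Spec_isdivby5; infer_instance

-- ===== CLAIM (what is proved, stated in full; the proofs are below) =====
def Claim_equal_isdivby5 : Prop := ∀ (bin_num : List Int), Dom_isdivby5 bin_num → Spec_isdivby5 bin_num (isdivby5 bin_num)

-- ===== LEMMAS AND PROOFS =====

-- the "plain" horner fold both sides reduce to
def pvHor (l : List Int) (a : Int) : Int := l.foldl (fun a b => a * 2 + b) a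

theorem pvHor_acc (l : List Int) (a : Int) :
    pvHor l a = a * 2 ^ l.length + pvHor l 0 := by
  induction l generalizing a with
  | nil => simp [pvHor]
  | cons b t ih =>
      have e1 : pvHor (b :: t) a = pvHor t (a * 2 + b) := rfl
      have e2 : pvHor (b :: t) 0 = pvHor t (0 * 2 + b) := rfl
      rw [e1, e2, ih (a * 2 + b), ih (0 * 2 + b)]
      simp only [List.length_cons]
      ring

theorem pvLoopA_eq (pre suf : List Int) (result : Int) (r : List Int) :
    (pvLoopA (pre ++ suf) ((suf.length : Int) - 1) result r).1 = result + pvHor suf 0 := by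
  induction suf generalizing pre result r with
  | nil =>
      rw [pvLoopA]
      simp [pvHor]
  | cons b t ih =>
      rw [pvLoopA]
      have hge : ((b :: t).length : Int) - 1 ≥ 0 := by simp
      rw [dif_pos hge]
      have hget : PySem.List.pyGet? (pre ++ b :: t) (-((((b :: t).length : Int) - 1) + 1))
          = some b := by
        have h1 : -((((b :: t).length : Int) - 1) + 1) = -(((t.length + 1 : Nat) : Int)) := by
          push_cast [List.length_cons]; ring
        rw [h1, PySem.List.pyGet?_neg_natCast _ _ (by omega) (by simp)]
        simp
      simp only [hget, Option.getD_some]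
      have htoNat : (((b :: t).length : Int) - 1).toNat = t.length := by simp
      have hidx : (((b :: t).length : Int) - 1) - 1 = ((t.length : Int)) - 1 := by
        push_cast [List.length_cons]; ring
      rw [htoNat, hidx]
      rw [show pre ++ b :: t = (pre ++ [b]) ++ t from by simp]
      rw [ih (pre ++ [b]) (result + b * 2 ^ t.length) (r ++ [result + b * 2 ^ t.length])]
      have hh : pvHor (b :: t) 0 = b * 2 ^ t.length + pvHor t 0 := by
        have e2 : pvHor (b :: t) 0 = pvHor t (0 * 2 + b) := rfl
        rw [e2, pvHor_acc t (0 * 2 + b)]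
        ring
      rw [hh]; ring

theorem pvFoldMod (l : List Int) (a c : Int) (h : a % 5 = c % 5) :
    l.foldl (fun rem bit => (rem * 2 + bit) % 5) (a % 5) = pvHor l c % 5 := by
  induction l generalizing a c with
  | nil => simpa [pvHor] using h
  | cons b t ih =>
      simp only [List.foldl_cons]
      have e : pvHor (b :: t) c = pvHor t (c * 2 + b) := rfl
      rw [e]
      have h3 : ((a % 5) * 2 + b) % 5 = (c * 2 + b) % 5 := by omega
      simpa using ih ((a % 5) * 2 + b) (c * 2 + b) h3

-- ===== VERDICT (by name: the statement is the Claim_ definition above) =====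
theorem isdivby5_spec : Claim_equal_isdivby5 := by
  intro bin_num _
  unfold Spec_isdivby5 isdivby5 isdivby5_alt
  have hA : (pvLoopA bin_num ((bin_num.length : Int) - 1) 0 []).1 = pvHor bin_num 0 := by
    simpa using pvLoopA_eq [] bin_num 0 []
  have h5 : (0:Int) < 5 := by norm_num
  have hB : bin_num.foldl (fun rem bit => PySem.Int.mod (rem * 2 + bit) 5) 0
      = pvHor bin_num 0 % 5 := by
    have hfun : (fun (rem bit : Int) => PySem.Int.mod (rem * 2 + bit) 5)
        = fun rem bit => (rem * 2 + bit) % 5 := by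
      funext rem bit
      exact PySem.Int.mod_eq_emod_of_pos h5
    rw [hfun]
    have := pvFoldMod bin_num 0 0 rfl
    simpa using this
  simp only [hA]
  rw [hB, PySem.Int.mod_eq_emod_of_pos h5]
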